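-- pv_equiv track=rewrite | github.com/Faiziab/Agentic_Simulation | simulation/traits/fact_check.py | parse_fact_check
-- ===== SOURCE A (Python) =====
-- def parse_fact_check(response: str) -> tuple[list[str], list[str], str, str]:
--     """Parse fact-check response into structured data."""
--     verified = []
--     flagged = []
--     rating = "pending"
--     notes = ""
--
--     current_section = ""
--     for line in response.split("\n"):
--         stripped = line.strip()
--
--         if stripped.upper().startswith("VERIFIED CLAIMS"):
--             current_section = "verified"
--         elif stripped.upper().startswith("FLAGGED CLAIMS"):
--             current_section = "flagged"
--         elif stripped.upper().startswith("OVERALL RATING"):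
--             rating_text = stripped.split(":", 1)[-1].strip().lower()
--             if "reliable" in rating_text and "mostly" not in rating_text and "needs" not in rating_text:
--                 rating = "reliable"
--             elif "mostly" in rating_text:
--                 rating = "mostly_reliable"
--             elif "needs" in rating_text or "review" in rating_text:
--                 rating = "needs_review"
--             current_section = ""
--         elif stripped.upper().startswith("REVIEW NOTES"):
--             current_section = "notes"
--         elif stripped.startswith("-") and current_section == "verified":
--             verified.append(stripped[1:].strip())
--         elif stripped.startswith("-") and current_section == "flagged":
--             flagged.append(stripped[1:].strip())
--         elif current_section == "notes" and stripped:
--             notes += stripped + " "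
--
--     return verified, flagged, rating, notes.strip()
-- ===== SOURCE B (Python) =====
-- def parse_fact_check(response: str) -> tuple[list[str], list[str], str, str]:
--     """Parse fact-check response into structured data (two-pass decomposition)."""
--     # Pass 1: a single state-machine sweep that only TAGS lines with the active
--     # section and captures OVERALL RATING header texts; no output is built here.
--     tagged = []        # (section, stripped line) for every non-header line
--     rating_texts = []  # the text after each OVERALL RATING header, stripped+lowered
--     section = ""
--     for line in response.split("\n"):
--         s = line.strip()
--         u = s.upper()
--         if u.startswith("VERIFIED CLAIMS"):
--             section = "verified"
--         elif u.startswith("FLAGGED CLAIMS"):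
--             section = "flagged"
--         elif u.startswith("OVERALL RATING"):
--             rating_texts.append(s.split(":", 1)[-1].strip().lower())
--             section = ""
--         elif u.startswith("REVIEW NOTES"):
--             section = "notes"
--         else:
--             tagged.append((section, s))
--
--     # Rating: fold the keyword priority over the captured header texts.
--     rating = "pending"
--     for t in rating_texts:
--         rating = _rating_step(rating, t)
--
--     # Pass 2: the outputs are plain comprehensions over the tagged lines.
--     verified = [s[1:].strip() for sec, s in tagged if sec == "verified" and s.startswith("-")]
--     flagged = [s[1:].strip() for sec, s in tagged if sec == "flagged" and s.startswith("-")]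
--     notes = " ".join(s for sec, s in tagged if sec == "notes" and s)
--     return verified, flagged, rating, notes
--
--
-- def _rating_step(rating: str, t: str) -> str:
--     if "reliable" in t and "mostly" not in t and "needs" not in t:
--         return "reliable"
--     if "mostly" in t:
--         return "mostly_reliable"
--     if "needs" in t or "review" in t:
--         return "needs_review"
--     return rating
-- ===== Notes on version B (the rewrite author's own statement) =====
-- stated objective: alternative
-- what changed: Replaces A's single loop that interleaves classification with output-building by a two-pass decomposition: one state-machine sweep that only tags lines with their section and captures rating-header texts, then a rating fold and plain comprehensions/join over the tagged lines.
import Mathlib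
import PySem

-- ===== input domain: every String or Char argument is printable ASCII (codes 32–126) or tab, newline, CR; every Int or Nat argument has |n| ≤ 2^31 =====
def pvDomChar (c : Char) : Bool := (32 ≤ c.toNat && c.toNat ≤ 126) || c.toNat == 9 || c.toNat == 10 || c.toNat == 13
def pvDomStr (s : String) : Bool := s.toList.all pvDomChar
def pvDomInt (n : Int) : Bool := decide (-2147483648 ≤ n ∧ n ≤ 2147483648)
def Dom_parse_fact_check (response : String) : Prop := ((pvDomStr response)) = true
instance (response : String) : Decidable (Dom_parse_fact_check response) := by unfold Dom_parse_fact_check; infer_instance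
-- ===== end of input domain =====

-- B replaces A's single output-building loop by a two-pass decomposition (tag lines, then
-- collect each output by comprehension/fold); same cost, alternative structure.


-- ===== PORT A =====
def pvStepA (st : List String × List String × String × String × String) (line : String) :
    List String × List String × String × String × String :=
  match st with
  | (verified, flagged, rating, notes, sect) =>
    let stripped := PySem.Str.strip line
    let up := PySem.Str.upper stripped
    if PySem.Str.startswith up "VERIFIED CLAIMS" then
      (verified, flagged, rating, notes, "verified")
    else if PySem.Str.startswith up "FLAGGED CLAIMS" then
      (verified, flagged, rating, notes, "flagged")
    else if PySem.Str.startswith up "OVERALL RATING" then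
      let ratingText := PySem.Str.lower (PySem.Str.strip
        ((PySem.List.pyGet? ((PySem.Str.splitMax? stripped ":" 1).getD []) (-1)).getD ""))
      let rating' :=
        if PySem.Str.isIn "reliable" ratingText && !PySem.Str.isIn "mostly" ratingText
            && !PySem.Str.isIn "needs" ratingText then "reliable"
        else if PySem.Str.isIn "mostly" ratingText then "mostly_reliable"
        else if PySem.Str.isIn "needs" ratingText || PySem.Str.isIn "review" ratingText then "needs_review"
        else rating
      (verified, flagged, rating', notes, "")
    else if PySem.Str.startswith up "REVIEW NOTES" then
      (verified, flagged, rating, notes, "notes")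
    else if PySem.Str.startswith stripped "-" && sect == "verified" then
      (verified ++ [PySem.Str.strip (PySem.Str.slice stripped (some 1) none)], flagged, rating, notes, sect)
    else if PySem.Str.startswith stripped "-" && sect == "flagged" then
      (verified, flagged ++ [PySem.Str.strip (PySem.Str.slice stripped (some 1) none)], rating, notes, sect)
    else if sect == "notes" && !(stripped == "") then
      (verified, flagged, rating, notes ++ stripped ++ " ", sect)
    else
      (verified, flagged, rating, notes, sect)

def parse_fact_check (response : String) : List String × List String × String × String :=
  match ((PySem.Str.split? response "\n").getD []).foldl pvStepA ([], [], "pending", "", "") with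
  | (verified, flagged, rating, notes, _) => (verified, flagged, rating, PySem.Str.strip notes)

-- ===== PORT B =====
-- pass 1: tag each non-header line with the active section; capture rating-header texts
def pvStepB (st : List (String × String) × List String × String) (line : String) :
    List (String × String) × List String × String :=
  match st with
  | (tagged, rtexts, sect) =>
    let s := PySem.Str.strip line
    let u := PySem.Str.upper s
    if PySem.Str.startswith u "VERIFIED CLAIMS" then (tagged, rtexts, "verified")
    else if PySem.Str.startswith u "FLAGGED CLAIMS" then (tagged, rtexts, "flagged")
    else if PySem.Str.startswith u "OVERALL RATING" then
      (tagged, rtexts ++ [PySem.Str.lower (PySem.Str.strip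
        ((PySem.List.pyGet? ((PySem.Str.splitMax? s ":" 1).getD []) (-1)).getD ""))], "")
    else if PySem.Str.startswith u "REVIEW NOTES" then (tagged, rtexts, "notes")
    else (tagged ++ [(sect, s)], rtexts, sect)

def pvRatingStep (rating t : String) : String :=
  if PySem.Str.isIn "reliable" t && !PySem.Str.isIn "mostly" t && !PySem.Str.isIn "needs" t then "reliable"
  else if PySem.Str.isIn "mostly" t then "mostly_reliable"
  else if PySem.Str.isIn "needs" t || PySem.Str.isIn "review" t then "needs_review"
  else rating

def pvDashItems (tag : String) (tagged : List (String × String)) : List String :=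
  (tagged.filter (fun p => p.1 == tag && PySem.Str.startswith p.2 "-")).map
    (fun p => PySem.Str.strip (PySem.Str.slice p.2 (some 1) none))

def parse_fact_check_alt (response : String) : List String × List String × String × String :=
  match ((PySem.Str.split? response "\n").getD []).foldl pvStepB ([], [], "") with
  | (tagged, rtexts, _) =>
    (pvDashItems "verified" tagged,
     pvDashItems "flagged" tagged,
     rtexts.foldl pvRatingStep "pending",
     PySem.Str.join " " ((tagged.filter (fun p => p.1 == "notes" && !(p.2 == ""))).map Prod.snd))

-- ===== PRECONDITION & SPEC =====
def Spec_parse_fact_check (response : String) (out : List String × List String × String × String) : Prop := out = parse_fact_check_alt response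
instance (response : String) (out : List String × List String × String × String) : Decidable (Spec_parse_fact_check response out) := by unfold Spec_parse_fact_check; infer_instance

-- ===== CLAIM (what is proved, stated in full; the proofs are below) =====
def Claim_equal_parse_fact_check : Prop := ∀ (response : String), Dom_parse_fact_check response → Spec_parse_fact_check response (parse_fact_check response)

-- ===== LEMMAS AND PROOFS =====

lemma rstrip_prefix (l : List Char) : PySem.Chars.rstrip l <+: l := by
  have h := List.dropWhile_suffix (l := l.reverse) PySem.Chars.isspace
  have h2 := (List.reverse_prefix (l₁ := List.dropWhile PySem.Chars.isspace l.reverse) (l₂ := l.reverse)).mpr h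
  simpa [PySem.Chars.rstrip] using h2
lemma rstrip_idem (l : List Char) : PySem.Chars.rstrip (PySem.Chars.rstrip l) = PySem.Chars.rstrip l := by
  simp [PySem.Chars.rstrip, List.dropWhile_idempotent]
lemma lstrip_eq_self_of_strip (l : List Char) (h : PySem.Chars.strip l = l) :
    PySem.Chars.lstrip l = l ∧ PySem.Chars.rstrip l = l := by
  have h1 : PySem.Chars.lstrip l <:+ l := List.dropWhile_suffix _
  have h2 : PySem.Chars.rstrip (PySem.Chars.lstrip l) <+: PySem.Chars.lstrip l := rstrip_prefix _
  have hlen : l.length ≤ (PySem.Chars.lstrip l).length := by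
    have := List.IsPrefix.length_le h2
    rw [show PySem.Chars.rstrip (PySem.Chars.lstrip l) = l from h] at this
    exact this
  have hl : PySem.Chars.lstrip l = l := List.IsSuffix.eq_of_length_le h1 hlen
  refine ⟨hl, ?_⟩
  rw [← h, PySem.Chars.strip, hl]
  exact rstrip_idem l
lemma strip_idem (l : List Char) : PySem.Chars.strip (PySem.Chars.strip l) = PySem.Chars.strip l := by
  rcases hy : PySem.Chars.strip l with _ | ⟨c, t⟩
  · simp [PySem.Chars.strip, PySem.Chars.lstrip, PySem.Chars.rstrip]
  · -- strip l = c :: t ; c is non-space since c heads lstrip l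
    have hpre : PySem.Chars.rstrip (PySem.Chars.lstrip l) <+: PySem.Chars.lstrip l := rstrip_prefix _
    rw [show PySem.Chars.rstrip (PySem.Chars.lstrip l) = PySem.Chars.strip l from rfl, hy] at hpre
    obtain ⟨u, hu⟩ := hpre
    have hc : PySem.Chars.isspace c = false := by
      have := List.head?_dropWhile_not PySem.Chars.isspace l
      rw [show List.dropWhile PySem.Chars.isspace l = PySem.Chars.lstrip l from rfl, ← hu] at this
      simpa using this
    rw [PySem.Chars.strip, show PySem.Chars.lstrip (c :: t) = c :: t by
      simp [PySem.Chars.lstrip, hc]]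
    have : PySem.Chars.rstrip (PySem.Chars.strip l) = PySem.Chars.strip l := by
      simpa [PySem.Chars.strip, PySem.Chars.rstrip] using
        congrArg List.reverse (List.dropWhile_idempotent (l := (PySem.Chars.lstrip l).reverse) PySem.Chars.isspace)
    rw [← hy, this, hy]
lemma str_strip_idem (s : String) : PySem.Str.strip (PySem.Str.strip s) = PySem.Str.strip s := by
  apply String.toList_inj.mp
  simp [strip_idem]

-- the notes accumulator A maintains, expressed over B's tagged lines
def pvNotesCat (tagged : List (String × String)) : String :=
  ((tagged.filter (fun p => p.1 == "notes" && !(p.2 == ""))).map Prod.snd).foldl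
    (fun acc s => acc ++ s ++ " ") ""

lemma pvStepB_step (l : String) (t : List (String × String)) (r : List String) (sec : String) :
    pvStepB (t, r, sec) l =
      (t ++ (pvStepB ([], [], sec) l).1, r ++ (pvStepB ([], [], sec) l).2.1,
       (pvStepB ([], [], sec) l).2.2) := by
  simp only [pvStepB]
  split_ifs <;> simp

lemma pvStepB_append (lines : List String) (t : List (String × String)) (r : List String)
    (sec : String) :
    lines.foldl pvStepB (t, r, sec) =
      (t ++ (lines.foldl pvStepB ([], [], sec)).1,
       r ++ (lines.foldl pvStepB ([], [], sec)).2.1,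
       (lines.foldl pvStepB ([], [], sec)).2.2) := by
  induction lines generalizing t r sec with
  | nil => simp
  | cons l rest ih =>
    simp only [List.foldl_cons]
    rcases hd : pvStepB ([], [], sec) l with ⟨a, b, c⟩
    rw [pvStepB_step, hd, ih, ih a b c]
    simp [List.append_assoc]

lemma pvStepB_stripped (lines : List String) (t : List (String × String)) (r : List String)
    (sec : String) (h : ∀ p ∈ t, PySem.Str.strip p.2 = p.2) :
    ∀ p ∈ (lines.foldl pvStepB (t, r, sec)).1, PySem.Str.strip p.2 = p.2 := by
  induction lines generalizing t r sec with
  | nil => simpa using h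
  | cons l rest ih =>
    simp only [List.foldl_cons, pvStepB]
    split_ifs <;> [skip; skip; skip; skip; skip] <;> try exact ih _ _ _ h
    apply ih
    intro p hp
    rcases List.mem_append.mp hp with hp | hp
    · exact h p hp
    · simp at hp
      rw [hp]
      exact str_strip_idem l

lemma foldl_strcat_start (xs : List String) (a : String) :
    xs.foldl (fun acc s => acc ++ s ++ " ") a = a ++ xs.foldl (fun acc s => acc ++ s ++ " ") "" := by
  induction xs generalizing a with
  | nil => simp [String.append_empty]
  | cons x xs ih =>
    simp only [List.foldl_cons]
    rw [ih, ih ("" ++ x ++ " ")]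
    simp [String.append_assoc, String.empty_append]

lemma pvNotesCat_append (a b : List (String × String)) :
    pvNotesCat (a ++ b) = pvNotesCat a ++ pvNotesCat b := by
  simp only [pvNotesCat, List.filter_append, List.map_append, List.foldl_append]
  rw [foldl_strcat_start]

lemma pvDashItems_append (tag : String) (a b : List (String × String)) :
    pvDashItems tag (a ++ b) = pvDashItems tag a ++ pvDashItems tag b := by
  simp [pvDashItems, List.filter_append]

lemma pvRatingStep_eq (rating t : String) :
    (if PySem.Str.isIn "reliable" t && !PySem.Str.isIn "mostly" t && !PySem.Str.isIn "needs" t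
        then "reliable"
      else if PySem.Str.isIn "mostly" t then "mostly_reliable"
      else if PySem.Str.isIn "needs" t || PySem.Str.isIn "review" t then "needs_review"
      else rating) = pvRatingStep rating t := rfl

set_option maxHeartbeats 1000000 in
lemma pvMainStep (l : String) (ver flag : List String) (rating notes sec : String) :
    pvStepA (ver, flag, rating, notes, sec) l =
      (ver ++ pvDashItems "verified" (pvStepB ([], [], sec) l).1,
       flag ++ pvDashItems "flagged" (pvStepB ([], [], sec) l).1,
       (pvStepB ([], [], sec) l).2.1.foldl pvRatingStep rating,
       notes ++ pvNotesCat (pvStepB ([], [], sec) l).1,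
       (pvStepB ([], [], sec) l).2.2) := by
  simp only [pvStepA, pvStepB]
  rw [pvRatingStep_eq]
  split_ifs <;>
    simp_all [pvDashItems, pvNotesCat, pvRatingStep,
      String.append_empty, String.append_assoc, String.empty_append, Bool.and_comm]

lemma pvMain (lines : List String) (ver flag : List String) (rating notes sec : String) :
    lines.foldl pvStepA (ver, flag, rating, notes, sec) =
      (ver ++ pvDashItems "verified" (lines.foldl pvStepB ([], [], sec)).1,
       flag ++ pvDashItems "flagged" (lines.foldl pvStepB ([], [], sec)).1,
       (lines.foldl pvStepB ([], [], sec)).2.1.foldl pvRatingStep rating,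
       notes ++ pvNotesCat (lines.foldl pvStepB ([], [], sec)).1,
       (lines.foldl pvStepB ([], [], sec)).2.2) := by
  induction lines generalizing ver flag rating notes sec with
  | nil => simp [pvDashItems, pvNotesCat, String.append_empty]
  | cons l rest ih =>
    simp only [List.foldl_cons]
    rcases hd : pvStepB ([], [], sec) l with ⟨d1, d2, d3⟩
    rw [pvMainStep, hd, ih, pvStepB_append rest d1 d2 d3]
    simp [pvDashItems_append, pvNotesCat_append, List.foldl_append,
      List.append_assoc, String.append_assoc]

lemma rstrip_append (a b : List Char) :
    PySem.Chars.rstrip (a ++ b) =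
      if PySem.Chars.rstrip b = [] then PySem.Chars.rstrip a else a ++ PySem.Chars.rstrip b := by
  simp only [PySem.Chars.rstrip, List.reverse_append, List.dropWhile_append]
  by_cases hb : (List.dropWhile PySem.Chars.isspace b.reverse).isEmpty
  · simp [List.isEmpty_iff.mp hb]
  · have : (List.dropWhile PySem.Chars.isspace b.reverse).reverse ≠ [] := by
      simp [List.isEmpty_iff] at hb; simpa using hb
    simp [hb, this]
lemma lstrip_append_of (a b : List Char) (h : PySem.Chars.lstrip a = a) (ha : a ≠ []) :
    PySem.Chars.lstrip (a ++ b) = a ++ b := by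
  have hd : List.dropWhile PySem.Chars.isspace a = a := h
  simp only [PySem.Chars.lstrip, List.dropWhile_append, List.isEmpty_iff, hd]
  simp [ha]
def catC (ps : List (List Char)) : List Char := ps.flatMap (fun s => s ++ [' '])
lemma lstrip_catC (ps : List (List Char))
    (h : ∀ s ∈ ps, PySem.Chars.strip s = s ∧ s ≠ []) :
    PySem.Chars.lstrip (catC ps) = catC ps := by
  cases ps with
  | nil => simp [catC, PySem.Chars.lstrip]
  | cons p t =>
    have hp := h p (List.mem_cons_self ..)
    have := (lstrip_eq_self_of_strip p hp.1).1
    simpa [catC, List.append_assoc] using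
      lstrip_append_of p ([' '] ++ catC t) this hp.2
lemma join_space_ne_nil (p : List Char) (ps : List (List Char)) (hp : p ≠ []) :
    PySem.Chars.join [' '] (p :: ps) ≠ [] := by
  cases ps with
  | nil => simpa [PySem.Chars.join_singleton] using hp
  | cons q t => simp [PySem.Chars.join_cons_cons]
lemma rstrip_catC (ps : List (List Char))
    (h : ∀ s ∈ ps, PySem.Chars.strip s = s ∧ s ≠ []) :
    PySem.Chars.rstrip (catC ps) = PySem.Chars.join [' '] ps := by
  induction ps with
  | nil => simp [catC, PySem.Chars.rstrip, PySem.Chars.join_nil]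
  | cons p t ih =>
    have hp := h p (List.mem_cons_self ..)
    have ht : ∀ s ∈ t, PySem.Chars.strip s = s ∧ s ≠ [] := fun s hs => h s (List.mem_cons_of_mem _ hs)
    have hcat : catC (p :: t) = p ++ ([' '] ++ catC t) := by simp [catC]
    rw [hcat, rstrip_append, rstrip_append]
    have hsp : PySem.Chars.rstrip [' '] = [] := by decide
    cases t with
    | nil =>
      simp only [catC, List.flatMap_nil]
      have : PySem.Chars.rstrip ([] : List Char) = [] := by decide
      simp [this, hsp, (lstrip_eq_self_of_strip p hp.1).2, PySem.Chars.join_singleton]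
    | cons q u =>
      have hjoin := ih ht
      have hne : PySem.Chars.join [' '] (q :: u) ≠ [] :=
        join_space_ne_nil q u (ht q (List.mem_cons_self ..)).2
      rw [hjoin]
      simp [hne, PySem.Chars.join_cons_cons]
lemma strip_catC (ps : List (List Char))
    (h : ∀ s ∈ ps, PySem.Chars.strip s = s ∧ s ≠ []) :
    PySem.Chars.strip (catC ps) = PySem.Chars.join [' '] ps := by
  rw [PySem.Chars.strip, lstrip_catC ps h, rstrip_catC ps h]
lemma toList_foldl_cat (ps : List String) (a : String) :
    (ps.foldl (fun acc s => acc ++ s ++ " ") a).toList = a.toList ++ catC (ps.map String.toList) := by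
  induction ps generalizing a with
  | nil => simp [catC]
  | cons p t ih =>
    simp only [List.foldl_cons, List.map_cons]
    rw [ih]
    simp [catC, String.toList_append]
lemma pvStripCat (ps : List String) (h : ∀ s ∈ ps, PySem.Str.strip s = s ∧ s ≠ "") :
    PySem.Str.strip (ps.foldl (fun acc s => acc ++ s ++ " ") "") = PySem.Str.join " " ps := by
  apply String.toList_inj.mp
  have h' : ∀ s ∈ ps.map String.toList, PySem.Chars.strip s = s ∧ s ≠ [] := by
    intro s hs
    obtain ⟨x, hx, rfl⟩ := List.mem_map.mp hs
    obtain ⟨h1, h2⟩ := h x hx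
    constructor
    · have := congrArg String.toList h1
      simpa using this
    · simpa using h2
  simp only [PySem.Str.strip, PySem.Str.join, String.toList_ofList]
  rw [toList_foldl_cat]
  simpa using strip_catC (ps.map String.toList) h'

-- ===== VERDICT (by name: the statement is the Claim_ definition above) =====
theorem parse_fact_check_spec : Claim_equal_parse_fact_check := by
  unfold Claim_equal_parse_fact_check
  intro response _
  unfold Spec_parse_fact_check parse_fact_check parse_fact_check_alt
  rcases hB : ((PySem.Str.split? response "\n").getD []).foldl pvStepB ([], [], "") with ⟨T, R, S⟩
  have hm := pvMain ((PySem.Str.split? response "\n").getD []) [] [] "pending" "" ""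
  rw [hB] at hm
  rw [hm]
  simp only [List.nil_append, String.empty_append]
  have hstr : ∀ p ∈ T, PySem.Str.strip p.2 = p.2 := by
    have := pvStepB_stripped ((PySem.Str.split? response "\n").getD []) [] [] ""
      (by intro p hp; simp at hp)
    rw [hB] at this
    exact this
  have hpieces : ∀ s ∈ (T.filter (fun p => p.1 == "notes" && !(p.2 == ""))).map Prod.snd,
      PySem.Str.strip s = s ∧ s ≠ "" := by
    intro s hs
    obtain ⟨p, hp, rfl⟩ := List.mem_map.mp hs
    have hmem := List.mem_filter.mp hp
    refine ⟨hstr p hmem.1, ?_⟩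
    have := hmem.2
    simp at this
    exact this.2
  rw [pvNotesCat, pvStripCat _ hpieces]
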